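-- pv_equiv track=rewrite | github.com/JBQuim/Boolean-Circuit-Evolution | NANDGate.py | getDependents
-- ===== SOURCE A (Python) =====
-- def getDependents(genome, numbs, *args):
--     if not args:
--         visited = set([])
--     else:
--         visited = args[0]
--
--     directDependents = [i for numb in numbs for i, k in enumerate(genome) if
--                         (k[0] == numb or k[1] == numb) and i not in visited]
--
--     visited.update(directDependents)
--
--     if len(directDependents) == 0:
--         return visited
--     else:
--         return getDependents(genome, directDependents, visited)
-- ===== SOURCE B (Python) =====
-- def getDependents(genome, numbs, *args):
--     if not args:
--         visited = set([])
--     else: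
--         visited = args[0]
--
--     # reverse-reference index: node number -> indices of gates that read it
--     index = {}
--     for i, gate in enumerate(genome):
--         index.setdefault(gate[0], []).append(i)
--         index.setdefault(gate[1], []).append(i)
--
--     # worklist / BFS over the dependency graph
--     queue = list(numbs)
--     head = 0
--     while head < len(queue):
--         numb = queue[head]
--         head += 1
--         for i in index.get(numb, []):
--             if i not in visited:
--                 visited.add(i)
--                 queue.append(i)
--     return visited
-- ===== Notes on version B (the rewrite author's own statement) =====
-- stated objective: faster
-- what changed: Replaces the level-by-level recursion that rescans the whole genome for every frontier node with a reverse-reference index built once plus a single BFS worklist over gate indices.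
import Mathlib
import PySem

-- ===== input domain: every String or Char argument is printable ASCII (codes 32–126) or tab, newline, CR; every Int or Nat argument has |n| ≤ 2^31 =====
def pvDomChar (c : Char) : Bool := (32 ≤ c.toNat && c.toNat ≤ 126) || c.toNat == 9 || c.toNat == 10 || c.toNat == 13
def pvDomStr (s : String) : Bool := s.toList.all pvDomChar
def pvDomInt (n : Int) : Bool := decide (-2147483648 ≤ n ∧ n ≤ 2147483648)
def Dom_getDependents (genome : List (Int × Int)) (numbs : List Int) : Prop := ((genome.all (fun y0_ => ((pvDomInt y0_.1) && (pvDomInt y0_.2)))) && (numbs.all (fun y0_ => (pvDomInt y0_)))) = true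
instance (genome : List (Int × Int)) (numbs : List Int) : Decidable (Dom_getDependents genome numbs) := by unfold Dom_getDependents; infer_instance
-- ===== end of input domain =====

-- B replaces A's level-by-level recursion that rescans the whole genome for every frontier node
-- by a reverse-reference index built once plus a single BFS worklist; return-value equivalence only
-- (A mutates a caller-supplied visited set when one is passed; the ports model the no-extra-argument call).

-- ===== PORT A =====
-- the level comprehension: [i for numb in numbs for i, k in enumerate(genome) if (k[0] == numb or k[1] == numb) and i not in visited]
def pyLevel (genome : List (Int × Int)) (numbs : List Int) (visited : PySem.Set Int) : List Int :=
  numbs.flatMap (fun numb =>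
    (PySem.List.enumerate genome 0).filterMap (fun ik =>
      if (ik.2.1 == numb || ik.2.2 == numb) && !(PySem.Set.contains visited ik.1)
      then some ik.1 else none))

-- helpers cited by the termination proofs of the two ports
theorem pv_notContains_iff {s : PySem.Set Int} {x : Int} :
    PySem.Set.contains s x = false ↔ x ∉ s := by
  rw [← Bool.not_eq_true, PySem.Set.contains_iff]

theorem pv_contains_eq_decide (s : PySem.Set Int) (x : Int) :
    PySem.Set.contains s x = decide (x ∈ s) := by
  cases hc : PySem.Set.contains s x
  · simp [pv_notContains_iff.1 hc]
  · simp [(PySem.Set.contains_iff s x).1 hc]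

theorem pyLevel_mem {genome : List (Int × Int)} {numbs : List Int} {visited : PySem.Set Int}
    {i : Int} (h : i ∈ pyLevel genome numbs visited) :
    (∃ k : Nat, k < genome.length ∧ i = (k : Int)) ∧ i ∉ visited := by
  simp only [pyLevel, List.mem_flatMap, List.mem_filterMap] at h
  obtain ⟨numb, hnumb, ik, hik, hcond⟩ := h
  rw [PySem.List.mem_enumerate_iff] at hik
  obtain ⟨k, hk, rfl⟩ := hik
  split at hcond
  · rename_i hc
    cases hcond
    simp only [Bool.and_eq_true, Bool.not_eq_true'] at hc
    have h2 := pv_notContains_iff.1 hc.2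
    constructor
    · exact ⟨k, hk, by simp⟩
    · simpa using h2
  · cases hcond

theorem pv_filter_length_mono {α : Type} (l : List α) (p q : α → Bool)
    (himp : ∀ x ∈ l, q x = true → p x = true) :
    (l.filter q).length ≤ (l.filter p).length := by
  induction l with
  | nil => simp
  | cons b l ih2 =>
    have himp2 : ∀ x ∈ l, q x = true → p x = true := fun x hx h => himp x (by simp [hx]) h
    by_cases hqb : q b = true
    · simp only [List.filter_cons, hqb, himp b (by simp) hqb, if_true, List.length_cons]
      exact Nat.succ_le_succ (ih2 himp2)
    · simp only [Bool.not_eq_true] at hqb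
      simp only [List.filter_cons, hqb, Bool.false_eq_true, if_false]
      split
      · exact Nat.le_succ_of_le (ih2 himp2)
      · exact ih2 himp2

theorem pv_filter_length_lt {α : Type} (l : List α) (p q : α → Bool)
    (himp : ∀ x ∈ l, q x = true → p x = true) (x0 : α) (hx0 : x0 ∈ l)
    (hp : p x0 = true) (hq : q x0 = false) :
    (l.filter q).length < (l.filter p).length := by
  induction l with
  | nil => cases hx0
  | cons a l ih =>
    have himp' : ∀ x ∈ l, q x = true → p x = true := fun x hx h => himp x (by simp [hx]) h
    rcases List.mem_cons.1 hx0 with rfl | hx0'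
    · have hql := pv_filter_length_mono l p q himp'
      simp only [List.filter_cons, hp, hq, if_true, Bool.false_eq_true, if_false,
        List.length_cons]
      omega
    · by_cases hqa : q a = true
      · simp only [List.filter_cons, hqa, himp a (by simp) hqa, if_true, List.length_cons]
        exact Nat.succ_lt_succ (ih himp' hx0')
      · simp only [Bool.not_eq_true] at hqa
        simp only [List.filter_cons, hqa, Bool.false_eq_true, if_false]
        have := ih himp' hx0'
        split
        · exact Nat.lt_succ_of_lt this
        · exact this

-- port of A's recursion: visited.update(directDependents); return or recurse on the level
def getDependentsAux (genome : List (Int × Int)) (numbs : List Int) (visited : PySem.Set Int) :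
    PySem.Set Int :=
  let dd := pyLevel genome numbs visited
  let visited' := PySem.Set.update visited dd
  if dd.length = 0 then visited' else getDependentsAux genome dd visited'
termination_by ((List.range genome.length).filter
    (fun j : Nat => !(PySem.Set.contains visited ((j : Nat) : Int)))).length
decreasing_by
  rename_i hne
  have hdd : dd ≠ [] := by
    intro h; rw [h] at hne; simp at hne
  obtain ⟨i0, hi0⟩ := List.exists_mem_of_ne_nil dd hdd
  obtain ⟨⟨k0, hk0, rfl⟩, hnv0⟩ := pyLevel_mem hi0
  refine pv_filter_length_lt _ _ _ ?_ k0 (List.mem_range.2 hk0) ?_ ?_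
  · intro j _ hj
    simp only [Bool.not_eq_true'] at hj ⊢
    rw [pv_contains_eq_decide] at hj ⊢
    simp only [decide_eq_false_iff_not] at hj ⊢
    rw [PySem.Set.mem_update _ _ _] at hj
    exact fun hv => hj (Or.inl hv)
  · simp only [Bool.not_eq_true']
    rw [pv_contains_eq_decide]
    exact decide_eq_false hnv0
  · rw [Bool.not_eq_false', pv_contains_eq_decide]
    simp only [decide_eq_true_eq]
    exact (PySem.Set.mem_update _ _ _).2 (Or.inr hi0)

def getDependents (genome : List (Int × Int)) (numbs : List Int) : List Int :=
  getDependentsAux genome numbs PySem.Set.empty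

-- ===== PORT B =====
-- index = {}; for i, gate in enumerate(genome): index.setdefault(gate[0], []).append(i); index.setdefault(gate[1], []).append(i)
def buildIndex (genome : List (Int × Int)) : PySem.Dict Int (List Int) :=
  (PySem.List.enumerate genome 0).foldl
    (fun d ik =>
      PySem.Dict.modify (PySem.Dict.modify d ik.2.1 [] (fun l => l ++ [ik.1])) ik.2.2 []
        (fun l => l ++ [ik.1]))
    PySem.Dict.empty

-- body of the inner loop: for i in index.get(numb, []): if i not in visited: visited.add(i); queue.append(i)
def pvStep (st : List Int × PySem.Set Int) (i : Int) : List Int × PySem.Set Int :=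
  if PySem.Set.contains st.2 i then st else (st.1 ++ [i], PySem.Set.add st.2 i)

-- the inner loop appends one block of fresh gate indices to both the queue and the visited list
theorem pvStep_foldl_spec (l : List Int) (q0 : List Int) (v : PySem.Set Int) :
    ∃ delta : List Int,
      l.foldl pvStep (q0, v) = (q0 ++ delta, v ++ delta) ∧ delta.Nodup ∧
        ∀ i ∈ delta, i ∈ l ∧ i ∉ v := by
  induction l generalizing q0 v with
  | nil => exact ⟨[], by simp, by simp, by simp⟩
  | cons a l ih =>
    by_cases ha : PySem.Set.contains v a = true
    · obtain ⟨delta, heq, hnd, hmem⟩ := ih q0 v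
      have hstep : pvStep (q0, v) a = (q0, v) := by
        simp [pvStep, (PySem.Set.contains_iff v a).1 ha]
      exact ⟨delta, by rw [List.foldl_cons, hstep]; exact heq, hnd,
        fun i hi => ⟨List.mem_cons_of_mem _ (hmem i hi).1, (hmem i hi).2⟩⟩
    · rw [Bool.not_eq_true] at ha
      have hna : a ∉ v := pv_notContains_iff.1 ha
      have hstep : pvStep (q0, v) a = (q0 ++ [a], v ++ [a]) := by
        simp only [pvStep]
        rw [if_neg (by simpa using hna), PySem.Set.add_of_not_mem hna]
      obtain ⟨delta, heq, hnd, hmem⟩ := ih (q0 ++ [a]) (v ++ [a])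
      refine ⟨a :: delta, ?_, ?_, ?_⟩
      · rw [List.foldl_cons, hstep, heq]; simp
      · refine List.nodup_cons.2 ⟨fun hmem' => ?_, hnd⟩
        have := (hmem a hmem').2
        simp at this
      · intro i hi
        rcases List.mem_cons.1 hi with rfl | hi'
        · exact ⟨List.mem_cons_self, hna⟩
        · obtain ⟨h1, h2⟩ := hmem i hi'
          exact ⟨List.mem_cons_of_mem _ h1, fun hv => h2 (by simp [hv])⟩

theorem pv_getD_subset_values (idx : PySem.Dict Int (List Int)) (k : Int) :
    ∀ x ∈ PySem.Dict.getD idx k [], x ∈ (PySem.Dict.values idx).flatten := by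
  intro x hx
  rw [PySem.Dict.getD_eq_get?_getD] at hx
  cases hget : PySem.Dict.get? idx k with
  | none => rw [hget] at hx; simp at hx
  | some v =>
    rw [hget] at hx
    simp only [Option.getD_some] at hx
    have hmem := PySem.Dict.mem_items_of_get?_eq_some (d := idx) hget
    refine List.mem_flatten.2 ⟨v, ?_, hx⟩
    simp only [PySem.Dict.values]
    exact List.mem_map.2 ⟨(k, v), hmem, rfl⟩

theorem pv_nodup_subset_length {l l' : List Int} (h : l.Nodup) (hs : l ⊆ l') :
    l.length ≤ l'.length :=
  (List.subperm_of_subset h hs).length_le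

theorem pv_length_filter_add {α : Type} (l : List α) (p : α → Bool) :
    (l.filter p).length + (l.filter (fun x => !p x)).length = l.length := by
  induction l with
  | nil => simp
  | cons a l ih =>
    by_cases h : p a = true
    · simp only [List.filter_cons, h, Bool.not_true, if_true, Bool.false_eq_true, if_false,
        List.length_cons]
      omega
    · simp only [Bool.not_eq_true] at h
      simp only [List.filter_cons, h, Bool.not_false, Bool.false_eq_true, if_false, if_true,
        List.length_cons]
      omega

-- worklist loop: while head < len(queue): numb = queue[head]; head += 1; <inner loop>
def bfsAux (idx : PySem.Dict Int (List Int)) (queue : List Int) (visited : PySem.Set Int) :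
    PySem.Set Int :=
  match queue with
  | [] => visited
  | numb :: rest =>
      let st := (PySem.Dict.getD idx numb []).foldl pvStep (rest, visited)
      bfsAux idx st.1 st.2
termination_by queue.length +
  (((PySem.Dict.values idx).flatten).filter (fun x => !(PySem.Set.contains visited x))).length
decreasing_by
  obtain ⟨delta, heq, hnd, hmem⟩ := pvStep_foldl_spec (PySem.Dict.getD idx numb []) rest visited
  have h1 : st.1 = rest ++ delta := by
    show (List.foldl pvStep (rest, visited) (PySem.Dict.getD idx numb [])).1 = rest ++ delta
    rw [heq]
  have h2 : st.2 = visited ++ delta := by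
    show (List.foldl pvStep (rest, visited) (PySem.Dict.getD idx numb [])).2 = visited ++ delta
    rw [heq]
  rw [h1, h2, List.length_append, List.length_cons]
  set V := (PySem.Dict.values idx).flatten
  have hsplit := pv_length_filter_add (V.filter (fun x => !(PySem.Set.contains visited x)))
    (fun x => decide (x ∈ delta))
  have hfilter : V.filter (fun x => !(PySem.Set.contains (visited ++ delta) x)) =
      (V.filter (fun x => !(PySem.Set.contains visited x))).filter
        (fun x => !(decide (x ∈ delta))) := by
    rw [List.filter_filter]
    apply List.filter_congr
    intro x _
    rw [pv_contains_eq_decide, pv_contains_eq_decide]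
    by_cases hv : x ∈ visited <;> by_cases hd : x ∈ delta <;>
      simp [hv, hd, List.mem_append]
  have hdlen : delta.length ≤
      ((V.filter (fun x => !(PySem.Set.contains visited x))).filter
        (fun x => decide (x ∈ delta))).length := by
    apply pv_nodup_subset_length hnd
    intro i hi
    obtain ⟨hil, hiv⟩ := hmem i hi
    rw [List.mem_filter, List.mem_filter]
    refine ⟨⟨pv_getD_subset_values idx numb i hil, ?_⟩, by simp [hi]⟩
    simp only [Bool.not_eq_true']
    rw [pv_contains_eq_decide]
    simpa using hiv
  rw [hfilter]
  omega

def getDependents_alt (genome : List (Int × Int)) (numbs : List Int) : List Int :=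
  bfsAux (buildIndex genome) numbs PySem.Set.empty

-- ===== PRECONDITION & SPEC =====
def Spec_getDependents (genome : List (Int × Int)) (numbs : List Int) (out : List Int) : Prop := out = getDependents_alt genome numbs
instance (genome : List (Int × Int)) (numbs : List Int) (out : List Int) : Decidable (Spec_getDependents genome numbs out) := by unfold Spec_getDependents; infer_instance

-- ===== CLAIM (what is proved, stated in full; the proofs are below) =====
def Claim_equal_getDependents : Prop := ∀ (genome : List (Int × Int)) (numbs : List Int), Dom_getDependents genome numbs → Spec_getDependents genome numbs (getDependents genome numbs)

-- ===== LEMMAS AND PROOFS =====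

-- gates reading node n, scanned in genome order, each once (the inner scan of A's comprehension)
def matchesL (genome : List (Int × Int)) (n : Int) : List Int :=
  (PySem.List.enumerate genome 0).filterMap (fun ik =>
    if ik.2.1 == n || ik.2.2 == n then some ik.1 else none)

-- one level step of A for a single frontier node, with the frozen visited filter
def level1 (genome : List (Int × Int)) (v : PySem.Set Int) (n : Int) : List Int :=
  (matchesL genome n).filter (fun i => !(PySem.Set.contains v i))

-- what buildIndex stores under n: gates in genome order, doubled where both wires read n
def adjL (genome : List (Int × Int)) (n : Int) : List Int :=
  (PySem.List.enumerate genome 0).flatMap (fun ik =>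
    (if ik.2.1 == n then [ik.1] else []) ++ (if ik.2.2 == n then [ik.1] else []))

-- erase duplicates, keeping first occurrences, relative to a seen list
def edf (seen : List Int) : List Int → List Int
  | [] => []
  | x :: xs => if x ∈ seen then edf seen xs else x :: edf (x :: seen) xs

theorem mem_edf_iff {seen l : List Int} {y : Int} :
    y ∈ edf seen l ↔ y ∈ l ∧ y ∉ seen := by
  induction l generalizing seen with
  | nil => simp [edf]
  | cons x xs ih =>
    by_cases hx : x ∈ seen
    · simp only [edf, hx, if_true, ih, List.mem_cons]
      constructor
      · rintro ⟨h1, h2⟩; exact ⟨Or.inr h1, h2⟩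
      · rintro ⟨h1 | h1, h2⟩
        · exact absurd (h1 ▸ hx) h2
        · exact ⟨h1, h2⟩
    · simp only [edf, hx, if_false, List.mem_cons, ih]
      constructor
      · rintro (rfl | ⟨h1, h2⟩)
        · exact ⟨Or.inl rfl, hx⟩
        · exact ⟨Or.inr h1, fun hs => h2 (Or.inr hs)⟩
      · rintro ⟨rfl | h1, h2⟩
        · exact Or.inl rfl
        · by_cases hxy : y = x
          · exact Or.inl hxy
          · exact Or.inr ⟨h1, fun hor => hor.elim hxy h2⟩

theorem edf_congr {s1 s2 l : List Int} (h : ∀ y, y ∈ s1 ↔ y ∈ s2) :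
    edf s1 l = edf s2 l := by
  induction l generalizing s1 s2 with
  | nil => rfl
  | cons x xs ih =>
    by_cases hx : x ∈ s1
    · simp only [edf, hx, (h x).1 hx, if_true]
      exact ih h
    · have hx2 : x ∉ s2 := fun h2 => hx ((h x).2 h2)
      simp only [edf, hx, hx2, if_false]
      refine congrArg _ (ih ?_)
      intro y
      simp only [List.mem_cons]
      exact or_congr Iff.rfl (h y)

theorem edf_append {seen l1 l2 : List Int} :
    edf seen (l1 ++ l2) = edf seen l1 ++ edf (seen ++ l1) l2 := by
  induction l1 generalizing seen with
  | nil => simp [edf]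
  | cons x xs ih =>
    by_cases hx : x ∈ seen
    · simp only [List.cons_append, edf, hx, if_true, ih]
      refine congrArg _ (edf_congr ?_)
      intro y
      simp only [List.mem_append, List.mem_cons]
      constructor
      · rintro (h | h)
        exacts [Or.inl h, Or.inr (Or.inr h)]
      · rintro (h | rfl | h)
        exacts [Or.inl h, Or.inl hx, Or.inr h]
    · simp only [List.cons_append, edf, hx, if_false]
      rw [ih, List.cons_append]
      refine congrArg _ (congrArg _ (edf_congr ?_))
      intro y
      simp only [List.mem_append, List.mem_cons]
      tauto

-- (1) A's comprehension is the flatMap of per-node frozen-filtered match lists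
theorem pv_filterMap_if_and (l : List (Int × (Int × Int))) (v : PySem.Set Int) (n : Int) :
    l.filterMap (fun ik =>
        if (ik.2.1 == n || ik.2.2 == n) && !(PySem.Set.contains v ik.1)
        then some ik.1 else none) =
      (l.filterMap (fun ik => if ik.2.1 == n || ik.2.2 == n then some ik.1 else none)).filter
        (fun i => !(PySem.Set.contains v i)) := by
  induction l with
  | nil => rfl
  | cons ik l ih =>
    by_cases hc : (ik.2.1 == n || ik.2.2 == n) = true
    · by_cases hv : PySem.Set.contains v ik.1 = true
      · have hA : ((ik.2.1 == n || ik.2.2 == n) && !(PySem.Set.contains v ik.1)) = false := by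
          rw [hc, hv]; rfl
        rw [List.filterMap_cons, List.filterMap_cons, if_neg (by rw [hA]; simp), if_pos hc,
          List.filter_cons, if_neg (by rw [hv]; simp)]
        exact ih
      · rw [Bool.not_eq_true] at hv
        have hA : ((ik.2.1 == n || ik.2.2 == n) && !(PySem.Set.contains v ik.1)) = true := by
          rw [hc, hv]; rfl
        rw [List.filterMap_cons, List.filterMap_cons, if_pos hA, if_pos hc,
          List.filter_cons, if_pos (by rw [hv]; rfl)]
        rw [ih]
    · rw [Bool.not_eq_true] at hc
      have hA : ((ik.2.1 == n || ik.2.2 == n) && !(PySem.Set.contains v ik.1)) = false := by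
        rw [hc, Bool.false_and]
      rw [List.filterMap_cons, List.filterMap_cons, if_neg (by rw [hA]; simp),
        if_neg (by rw [hc]; simp)]
      exact ih

theorem pyLevel_eq (genome : List (Int × Int)) (numbs : List Int) (v : PySem.Set Int) :
    pyLevel genome numbs v = numbs.flatMap (level1 genome v) := by
  unfold pyLevel level1 matchesL
  induction numbs with
  | nil => rfl
  | cons n numbs ih =>
    rw [List.flatMap_cons, List.flatMap_cons, ih, pv_filterMap_if_and]

-- (2) the reverse-reference index stores exactly adjL
theorem buildIndex_getD_aux (l : List (Int × (Int × Int))) (d : PySem.Dict Int (List Int))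
    (n : Int) :
    PySem.Dict.getD
        (l.foldl (fun d ik =>
          PySem.Dict.modify (PySem.Dict.modify d ik.2.1 [] (fun l => l ++ [ik.1])) ik.2.2 []
            (fun l => l ++ [ik.1])) d) n [] =
      PySem.Dict.getD d n [] ++
        l.flatMap (fun ik =>
          (if ik.2.1 == n then [ik.1] else []) ++ (if ik.2.2 == n then [ik.1] else [])) := by
  induction l generalizing d with
  | nil => simp
  | cons ik l ih =>
    rw [List.foldl_cons, ih, List.flatMap_cons]
    have hstep : PySem.Dict.getD
        (PySem.Dict.modify (PySem.Dict.modify d ik.2.1 [] (fun l => l ++ [ik.1])) ik.2.2 []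
          (fun l => l ++ [ik.1])) n [] =
        PySem.Dict.getD d n [] ++
          ((if ik.2.1 == n then [ik.1] else []) ++ (if ik.2.2 == n then [ik.1] else [])) := by
      by_cases h2 : n = ik.2.2 <;> by_cases h1 : n = ik.2.1
      · simp [PySem.Dict.getD_modify, ← h1, ← h2, List.append_assoc]
      · simp [PySem.Dict.getD_modify, ← h2, h1, Ne.symm h1]
      · simp [PySem.Dict.getD_modify, h2, ← h1, Ne.symm h2]
      · simp [PySem.Dict.getD_modify, h1, h2, Ne.symm h1, Ne.symm h2]
    rw [hstep]
    simp [List.append_assoc]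

theorem buildIndex_getD (genome : List (Int × Int)) (n : Int) :
    PySem.Dict.getD (buildIndex genome) n [] = adjL genome n := by
  unfold buildIndex adjL
  rw [buildIndex_getD_aux]
  simp

-- (3) folding pvStep over the doubled adjacency list equals folding over matchesL
theorem pvStep_self (st : List Int × PySem.Set Int) (i : Int) :
    pvStep (pvStep st i) i = pvStep st i := by
  by_cases h : PySem.Set.contains st.2 i = true
  · simp [pvStep, (PySem.Set.contains_iff _ _).1 h]
  · rw [Bool.not_eq_true] at h
    have hn := pv_notContains_iff.1 h
    have h2 : ((PySem.Set.add st.2 i) : PySem.Set Int).contains i = true :=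
      (PySem.Set.contains_iff _ _).2 ((PySem.Set.mem_add _ _ _).2 (Or.inr rfl))
    simp [pvStep, hn]

theorem pvStep_foldl_adj_eq (genome : List (Int × Int)) (n : Int)
    (st : List Int × PySem.Set Int) :
    (adjL genome n).foldl pvStep st = (matchesL genome n).foldl pvStep st := by
  unfold adjL matchesL
  generalize PySem.List.enumerate genome 0 = l
  induction l generalizing st with
  | nil => rfl
  | cons ik l ih =>
    rw [List.flatMap_cons, List.filterMap_cons, List.foldl_append]
    by_cases h1 : (ik.2.1 == n) = true <;> by_cases h2 : (ik.2.2 == n) = true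
    · rw [if_pos h1, if_pos h2, if_pos (by simp_all)]
      simp only [List.singleton_append, List.foldl_cons, List.foldl_nil, pvStep_self]
      exact ih _
    · rw [if_pos h1, if_neg h2, if_pos (by simp_all)]
      simp only [List.append_nil, List.foldl_cons, List.foldl_nil]
      exact ih _
    · rw [if_neg h1, if_pos h2, if_pos (by simp_all)]
      simp only [List.nil_append, List.foldl_cons, List.foldl_nil]
      exact ih _
    · rw [if_neg h1, if_neg h2, if_neg (by simp_all)]
      simp only [List.append_nil, List.foldl_nil]
      exact ih _

-- (4) the inner loop, started from update v0 acc, computes edf acc of the frozen-filtered list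
theorem pv_fold_edf (l : List Int) (q0 : List Int) (v0 : PySem.Set Int) (acc : List Int)
    (hacc : ∀ a ∈ acc, a ∉ v0) :
    l.foldl pvStep (q0, PySem.Set.update v0 acc) =
      (q0 ++ edf acc (l.filter (fun i => !(PySem.Set.contains v0 i))),
       PySem.Set.update v0 (acc ++ edf acc (l.filter (fun i => !(PySem.Set.contains v0 i))))) := by
  induction l generalizing q0 acc with
  | nil => simp [edf]
  | cons x xs ih =>
    rw [List.foldl_cons]
    by_cases hv : PySem.Set.contains v0 x = true
    · have hxa : x ∉ acc := fun h => hacc x h ((PySem.Set.contains_iff _ _).1 hv)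
      have hcx : x ∈ PySem.Set.update v0 acc :=
        (PySem.Set.mem_update _ _ _).2 (Or.inl ((PySem.Set.contains_iff _ _).1 hv))
      have hstep : pvStep (q0, PySem.Set.update v0 acc) x = (q0, PySem.Set.update v0 acc) := by
        simp [pvStep, hcx]
      rw [hstep, ih q0 acc hacc]
      have hfil : (x :: xs).filter (fun i => !(PySem.Set.contains v0 i)) =
          xs.filter (fun i => !(PySem.Set.contains v0 i)) := by
        rw [List.filter_cons, if_neg (by rw [hv]; simp)]
      rw [hfil]
    · rw [Bool.not_eq_true] at hv
      have hnv : x ∉ v0 := pv_notContains_iff.1 hv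
      by_cases hxa : x ∈ acc
      · have hcx : x ∈ PySem.Set.update v0 acc := (PySem.Set.mem_update _ _ _).2 (Or.inr hxa)
        have hstep : pvStep (q0, PySem.Set.update v0 acc) x = (q0, PySem.Set.update v0 acc) := by
          simp [pvStep, hcx]
        rw [hstep, ih q0 acc hacc]
        have : edf acc ((x :: xs).filter (fun i => !(PySem.Set.contains v0 i))) =
            edf acc (xs.filter (fun i => !(PySem.Set.contains v0 i))) := by
          rw [List.filter_cons, if_pos (by rw [hv]; rfl)]
          show edf acc (x :: _) = _
          simp only [edf, hxa, if_true]
        rw [this]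
      · have hcx : x ∉ PySem.Set.update v0 acc := by
          rw [PySem.Set.mem_update _ _ _]
          rintro (h | h)
          · exact hnv h
          · exact hxa h
        have hstep : pvStep (q0, PySem.Set.update v0 acc) x =
            (q0 ++ [x], PySem.Set.update v0 (acc ++ [x])) := by
          simp only [pvStep]
          rw [if_neg (by simpa using hcx), PySem.Set.add_of_not_mem hcx, PySem.Set.update_append,
            PySem.Set.update_cons, PySem.Set.update_nil, PySem.Set.add_of_not_mem hcx]
        have hacc' : ∀ a ∈ acc ++ [x], a ∉ v0 := by
          intro a ha
          rcases List.mem_append.1 ha with h | h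
          · exact hacc a h
          · simp only [List.mem_singleton] at h
            exact h ▸ hnv
        rw [hstep, ih (q0 ++ [x]) (acc ++ [x]) hacc']
        have hedf : edf acc ((x :: xs).filter (fun i => !(PySem.Set.contains v0 i))) =
            x :: edf (acc ++ [x]) (xs.filter (fun i => !(PySem.Set.contains v0 i))) := by
          rw [List.filter_cons, if_pos (by rw [hv]; rfl)]
          show edf acc (x :: _) = _
          simp only [edf, hxa, if_false]
          refine congrArg _ (edf_congr ?_)
          intro y
          simp only [List.mem_cons, List.mem_append]
          tauto
        rw [hedf]
        simp [List.append_assoc]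

-- (7) updating with edf of a list adds the same elements in the same order
theorem pv_update_edf (l : List Int) (v0 : PySem.Set Int) (seen : List Int)
    (hseen : ∀ s ∈ seen, s ∈ v0) :
    PySem.Set.update v0 (edf seen l) = PySem.Set.update v0 l := by
  induction l generalizing v0 seen with
  | nil => rfl
  | cons x xs ih =>
    by_cases hx : x ∈ seen
    · rw [edf, if_pos hx, ih v0 seen hseen, PySem.Set.update_cons,
        PySem.Set.add_of_mem (hseen x hx)]
    · rw [edf, if_neg hx]
      show PySem.Set.update v0 (x :: _) = _
      rw [PySem.Set.update_cons, PySem.Set.update_cons]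
      refine ih (PySem.Set.add v0 x) (x :: seen) ?_
      intro s hs
      rcases List.mem_cons.1 hs with rfl | hs'
      · exact (PySem.Set.mem_add _ _ _).2 (Or.inr rfl)
      · exact (PySem.Set.mem_add _ _ _).2 (Or.inl (hseen s hs'))

-- B's one-queue-item step equation, rewritten through the index characterisation
theorem bfs_step (genome : List (Int × Int)) (n : Int) (rest : List Int)
    (v : PySem.Set Int) :
    bfsAux (buildIndex genome) (n :: rest) v =
      bfsAux (buildIndex genome) ((matchesL genome n).foldl pvStep (rest, v)).1
        ((matchesL genome n).foldl pvStep (rest, v)).2 := by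
  rw [bfsAux, buildIndex_getD, pvStep_foldl_adj_eq]

-- (6) processing a queue segment from update v0 acc drains it into edf acc of A's level list
theorem bfs_seg (genome : List (Int × Int)) (q : List Int) : ∀ (q2 acc : List Int)
    (v0 : PySem.Set Int), (∀ a ∈ acc, a ∉ v0) →
    bfsAux (buildIndex genome) (q ++ q2) (PySem.Set.update v0 acc) =
      bfsAux (buildIndex genome)
        (q2 ++ edf acc (q.flatMap (level1 genome v0)))
        (PySem.Set.update v0 (acc ++ edf acc (q.flatMap (level1 genome v0)))) := by
  induction q with
  | nil => intro q2 acc v0 _; simp [edf]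
  | cons n q' ih =>
    intro q2 acc v0 hacc
    rw [List.cons_append, bfs_step, pv_fold_edf _ _ _ _ hacc]
    have hl1 : (matchesL genome n).filter (fun i => !(PySem.Set.contains v0 i)) =
        level1 genome v0 n := rfl
    rw [hl1]
    have hacc' : ∀ a ∈ acc ++ edf acc (level1 genome v0 n), a ∉ v0 := by
      intro a ha
      rcases List.mem_append.1 ha with h | h
      · exact hacc a h
      · have h1 := (mem_edf_iff.1 h).1
        have h2 := List.mem_filter.1 h1
        exact pv_notContains_iff.1 (by simpa using h2.2)
    have hih := ih (q2 ++ edf acc (level1 genome v0 n))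
      (acc ++ edf acc (level1 genome v0 n)) v0 hacc'
    rw [List.append_assoc, hih, List.flatMap_cons]
    have hedfsplit : edf acc (level1 genome v0 n ++ q'.flatMap (level1 genome v0)) =
        edf acc (level1 genome v0 n) ++
          edf (acc ++ edf acc (level1 genome v0 n)) (q'.flatMap (level1 genome v0)) := by
      rw [edf_append]
      refine congrArg _ (edf_congr ?_)
      intro y
      simp only [List.mem_append, mem_edf_iff]
      tauto
    rw [hedfsplit]
    rw [List.append_assoc, List.append_assoc]

-- all matches of a node that sits in the processed segment are visited afterwards
theorem bfs_seg_visits (genome : List (Int × Int)) (q1 : List Int) (v0 : PySem.Set Int)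
    (n : Int) (hn : n ∈ q1) :
    ∀ i ∈ matchesL genome n,
      i ∈ PySem.Set.update v0 (edf [] (q1.flatMap (level1 genome v0))) := by
  intro i hi
  rw [PySem.Set.mem_update _ _ _]
  by_cases hv : i ∈ v0
  · exact Or.inl hv
  · refine Or.inr (mem_edf_iff.2 ⟨?_, List.not_mem_nil⟩)
    refine List.mem_flatMap.2 ⟨n, hn, ?_⟩
    rw [level1, List.mem_filter]
    refine ⟨hi, ?_⟩
    simp only [Bool.not_eq_true']
    rw [pv_contains_eq_decide]
    exact decide_eq_false hv

-- a queue item with all matches visited is a no-op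
theorem bfs_noop (genome : List (Int × Int)) (n : Int) (q : List Int) (v : PySem.Set Int)
    (h : ∀ i ∈ matchesL genome n, i ∈ v) :
    bfsAux (buildIndex genome) (n :: q) v = bfsAux (buildIndex genome) q v := by
  rw [bfs_step]
  have h0 : PySem.Set.update v ([] : List Int) = v := rfl
  have := pv_fold_edf (matchesL genome n) q v [] (by simp)
  rw [h0] at this
  have hfil : (matchesL genome n).filter (fun i => !(PySem.Set.contains v i)) = [] := by
    rw [List.filter_eq_nil_iff]
    intro i hi
    rw [pv_contains_eq_decide]
    simp [h i hi]
  rw [this, hfil]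
  simp [edf]

-- a repeated queue entry behind its first occurrence can be dropped
theorem bfs_dup (genome : List (Int × Int)) (q1 : List Int) (n : Int) (q2 : List Int)
    (v0 : PySem.Set Int) (hn : n ∈ q1) :
    bfsAux (buildIndex genome) (q1 ++ n :: q2) v0 =
      bfsAux (buildIndex genome) (q1 ++ q2) v0 := by
  have h0 : PySem.Set.update v0 ([] : List Int) = v0 := rfl
  have hs1 := bfs_seg genome q1 (n :: q2) [] v0 (by simp)
  have hs2 := bfs_seg genome q1 q2 [] v0 (by simp)
  rw [h0] at hs1 hs2
  simp only [List.nil_append] at hs1 hs2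
  rw [hs1, hs2, List.cons_append]
  exact bfs_noop genome n _ _ (bfs_seg_visits genome q1 v0 n hn)

-- dropping all seen duplicates from the queue does not change the result
theorem bfs_edf (genome : List (Int × Int)) (l : List Int) : ∀ (p : List Int)
    (v : PySem.Set Int),
    bfsAux (buildIndex genome) (p ++ l) v = bfsAux (buildIndex genome) (p ++ edf p l) v := by
  induction l with
  | nil => intro p v; rfl
  | cons x xs ih =>
    intro p v
    by_cases hx : x ∈ p
    · rw [bfs_dup genome p x xs v hx, ih p v, edf, if_pos hx]
    · rw [show p ++ x :: xs = (p ++ [x]) ++ xs by simp, ih (p ++ [x]) v]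
      rw [edf, if_neg hx]
      rw [show p ++ x :: edf (x :: p) xs = (p ++ [x]) ++ edf (x :: p) xs by simp]
      refine congrArg (fun l => bfsAux (buildIndex genome) (p ++ [x] ++ l) v) (edf_congr ?_)
      intro y
      simp only [List.mem_append, List.mem_cons]
      tauto

-- MAIN: A's level recursion equals B's worklist
theorem pv_main (genome : List (Int × Int)) (numbs : List Int) (v : PySem.Set Int) :
    getDependentsAux genome numbs v = bfsAux (buildIndex genome) numbs v := by
  fun_induction getDependentsAux genome numbs v with
  | case1 numbs v dd visited' hlen =>
    have hdd : pyLevel genome numbs v = [] := List.eq_nil_of_length_eq_zero hlen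
    have h0 : PySem.Set.update v ([] : List Int) = v := rfl
    have hs := bfs_seg genome numbs [] [] v (by simp)
    rw [h0] at hs
    simp only [List.append_nil, List.nil_append] at hs
    rw [← pyLevel_eq] at hs
    show PySem.Set.update v (pyLevel genome numbs v) = _
    rw [hdd] at hs ⊢
    rw [hs]
    show v = bfsAux (buildIndex genome) [] v
    rw [bfsAux]
  | case2 numbs v dd visited' hlen ih =>
    have h0 : PySem.Set.update v ([] : List Int) = v := rfl
    have hs := bfs_seg genome numbs [] [] v (by simp)
    rw [h0] at hs
    simp only [List.append_nil, List.nil_append] at hs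
    rw [← pyLevel_eq] at hs
    have hupd : PySem.Set.update v (edf [] dd) = PySem.Set.update v dd :=
      pv_update_edf dd v [] (by simp)
    have hrem := bfs_edf genome dd [] (PySem.Set.update v dd)
    simp only [List.nil_append] at hrem
    have hv' : visited' = PySem.Set.update v dd := rfl
    rw [hs, hupd, ← hrem, ← hv']
    exact ih.symm ▸ ih

-- ===== VERDICT (by name: the statement is the Claim_ definition above) =====
theorem getDependents_spec : Claim_equal_getDependents := by
  intro genome numbs _
  unfold Spec_getDependents getDependents getDependents_alt
  exact pv_main genome numbs PySem.Set.empty
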